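-- pv_equiv track=rewrite | github.com/iproha94/contests | 1121/b.py | f
-- ===== SOURCE A (Python) =====
-- def f(n, a_arr):
--     sum_arr = []
--     for i in range(n):
--         for j in range(i + 1, n):
--             sum_arr.append(a_arr[i] + a_arr[j])
--
--     max_count = 0
--     sum_arr.sort()
--
--     i = 0
--     j = 1
--     while i < len(sum_arr):
--         while j < len(sum_arr) and sum_arr[i] == sum_arr[j]:
--             j += 1
--         if (j - i) > max_count:
--             max_count = j - i
--         i = j
--         j += 1
--
--     return max_count
-- ===== SOURCE B (Python) =====
-- def f(n, a_arr):
--     # One pass: count each pairwise sum in a dict, then take the largest count.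
--     counts = {}
--     for i in range(n):
--         for j in range(i + 1, n):
--             s = a_arr[i] + a_arr[j]
--             counts[s] = counts.get(s, 0) + 1
--     return max(counts.values(), default=0)
-- ===== Notes on version B (the rewrite author's own statement) =====
-- stated objective: alternative
-- what changed: B counts each pairwise sum in a hash dictionary during one pass over the pairs and returns the maximal count, instead of materialising the list of all sums, sorting it and scanning equal runs with a two-index while loop.
import Mathlib
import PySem

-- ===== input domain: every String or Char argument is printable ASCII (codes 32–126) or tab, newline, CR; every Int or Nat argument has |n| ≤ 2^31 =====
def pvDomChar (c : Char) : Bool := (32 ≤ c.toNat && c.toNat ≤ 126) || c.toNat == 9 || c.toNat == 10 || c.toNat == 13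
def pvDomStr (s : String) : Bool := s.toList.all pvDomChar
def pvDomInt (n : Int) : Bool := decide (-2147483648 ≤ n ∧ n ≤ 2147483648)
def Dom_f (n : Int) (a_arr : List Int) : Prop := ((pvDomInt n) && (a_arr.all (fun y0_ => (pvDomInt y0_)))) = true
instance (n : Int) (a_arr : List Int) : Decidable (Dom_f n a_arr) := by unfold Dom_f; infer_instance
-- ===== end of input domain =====

-- B counts each pairwise sum in a dictionary during one pass over the pairs and returns the
-- maximal count, instead of A's sort-the-sums-then-scan-equal-runs two-index while loop
-- (objective: alternative algorithm, similar quadratic pair enumeration, no sort).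

-- ===== PORT A =====
-- sum_arr built by the double loop; pyGetD default 0 is exact under Pre_f (all indices are
-- in range there; Python raises an IndexError exactly on the inputs Pre_f excludes).
def buildSums (n : Int) (a : List Int) : List Int :=
  List.foldl (fun acc i =>
      List.foldl (fun acc j => acc ++ [PySem.List.pyGetD a i 0 + PySem.List.pyGetD a j 0])
        acc (PySem.List.pyRange (i + 1) n 1))
    [] (PySem.List.pyRange 0 n 1)

-- the inner `while j < len(sum_arr) and sum_arr[i] == sum_arr[j]: j += 1`
-- (fuel only makes the loop total; every call below supplies enough fuel for the
-- loop to reach its Python exit condition)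
def fInner (s : List Int) (i : Int) : Nat → Int → Int
  | 0, j => j
  | fuel + 1, j =>
    if j < (s.length : Int) ∧ PySem.List.pyGet? s i == PySem.List.pyGet? s j then
      fInner s i fuel (j + 1)
    else j

-- the outer `while i < len(sum_arr): …` (j always equals i+1 at the loop head)
def fOuter (s : List Int) : Nat → Int → Int → Int → Int
  | 0, _, _, macc => macc
  | fuel + 1, i, j, macc =>
    if i < (s.length : Int) then
      let j' := fInner s i (s.length + 1) j
      fOuter s fuel j' (j' + 1) (if j' - i > macc then j' - i else macc)
    else macc

def f (n : Int) (a_arr : List Int) : Int :=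
  let s := PySem.List.sorted (buildSums n a_arr) (fun x => x) false
  fOuter s (s.length + 1) 0 1 0

-- ===== PORT B =====
-- pyGetD default 0 is exact under Pre_f (all indices in range there),同 A's port.
def f_alt (n : Int) (a_arr : List Int) : Int :=
  let d := List.foldl (fun d i =>
      List.foldl (fun d j =>
          let s := PySem.List.pyGetD a_arr i 0 + PySem.List.pyGetD a_arr j 0
          d.insert s (d.getD s 0 + 1))
        d (PySem.List.pyRange (i + 1) n 1))
    PySem.Dict.empty (PySem.List.pyRange 0 n 1)
  match PySem.List.max? d.values (fun v => v) with
  | some m => m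
  | none => 0

-- ===== PRECONDITION & SPEC =====
-- Pre_f excludes exactly the inputs where Python A raises IndexError: n > len(a_arr) with
-- n ≥ 2 (then a_arr[i] is evaluated for some i ≥ len). Both programs raise there.
def Pre_f (n : Int) (a_arr : List Int) : Prop := n ≤ (a_arr.length : Int) ∨ n ≤ 1
instance (n : Int) (a_arr : List Int) : Decidable (Pre_f n a_arr) := by unfold Pre_f; infer_instance
def pvWitness_f : Int × List Int := (3, [1, 2, 3])
def Spec_f (n : Int) (a_arr : List Int) (out : Int) : Prop := out = f_alt n a_arr
instance (n : Int) (a_arr : List Int) (out : Int) : Decidable (Spec_f n a_arr out) := by unfold Spec_f; infer_instance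

-- ===== CLAIM (what is proved, stated in full; the proofs are below) =====
def Claim_equal_f : Prop := ∀ (n : Int) (a_arr : List Int), Dom_f n a_arr → Pre_f n a_arr → Spec_f n a_arr (f n a_arr)

-- ===== LEMMAS AND PROOFS =====

-- the run-length scan of A, written structurally on the sorted list
def scanRuns : List Int → Int → Int
  | [], m => m
  | x :: r, m =>
    scanRuns (r.dropWhile (· == x))
      (if (1 + ((r.takeWhile (· == x)).length : Int)) > m then 1 + ((r.takeWhile (· == x)).length : Int) else m)
termination_by l _ => l.length
decreasing_by
  have := List.length_dropWhile_le (· == x) r; simp; omega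

-- the "max count per distinct value" view shared by both sides
def bmax (l : List Int) : Int :=
  ((PySem.Set.ofList l).map (fun k => (l.count k : Int))).foldl max 0

theorem drop_len_takeWhile (p : Int → Bool) (l : List Int) :
    l.drop (l.takeWhile p).length = l.dropWhile p := by
  induction l with
  | nil => rfl
  | cons x r ih => by_cases h : p x <;> simp [h, ih]

theorem foldl_foldl_flatMap {α β γ : Type} (L : List α) (g : α → List β) (step : γ → β → γ) (b : γ) :
    L.foldl (fun acc x => (g x).foldl step acc) b = (L.flatMap g).foldl step b := by
  induction L generalizing b with
  | nil => rfl
  | cons x L ih => simp [List.foldl_append, ih]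

theorem buildSums_eq (n : Int) (a : List Int) :
    buildSums n a = (PySem.List.pyRange 0 n 1).flatMap
      (fun i => (PySem.List.pyRange (i + 1) n 1).map
        (fun j => PySem.List.pyGetD a i 0 + PySem.List.pyGetD a j 0)) := by
  unfold buildSums
  simp only [PySem.List.foldl_append_singleton_eq_map]
  rw [PySem.List.foldl_append_eq_flatMap]
  simp

theorem dict_eq (n : Int) (a : List Int) :
    (List.foldl (fun d i =>
        List.foldl (fun d j =>
            let s := PySem.List.pyGetD a i 0 + PySem.List.pyGetD a j 0
            d.insert s (d.getD s 0 + 1))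
          d (PySem.List.pyRange (i + 1) n 1))
      PySem.Dict.empty (PySem.List.pyRange 0 n 1)) = PySem.Dict.counter (buildSums n a) := by
  rw [buildSums_eq, ← PySem.Dict.foldl_insert_getD_add_one_eq_counter, ← foldl_foldl_flatMap]
  congr 1
  funext d i
  rw [List.foldl_map]

theorem foldl_max_max (l : List Int) (a b : Int) :
    l.foldl max (max a b) = max a (l.foldl max b) := by
  induction l generalizing b with
  | nil => rfl
  | cons c l ih => simp only [List.foldl_cons, max_assoc, ih]

theorem matchmax_eq (l : List Int) (hpos : ∀ v ∈ l, (1 : Int) ≤ v) :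
    (match PySem.List.max? l (fun v => v) with | some m => m | none => 0) = l.foldl max 0 := by
  cases l with
  | nil => rfl
  | cons x t =>
    rw [PySem.List.max?_id_cons]
    have hx : max 0 x = x := max_eq_right (by have := hpos x (by simp); omega)
    simp only [List.foldl_cons]
    rw [hx]

theorem foldl_add_cons (l : List Int) (s : List Int) (x : Int) (hxl : x ∉ l) (hxs : x ∉ s) :
    List.foldl PySem.Set.add (x :: s) l = x :: List.foldl PySem.Set.add s l := by
  induction l generalizing s with
  | nil => rfl
  | cons y l ih =>
    have hyx : y ≠ x := fun h => hxl (by simp [h])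
    have hstep : PySem.Set.add (x :: s) y = x :: PySem.Set.add s y := by
      simp only [PySem.Set.add, PySem.Set.contains, List.contains_cons,
        beq_eq_false_iff_ne.mpr hyx, Bool.false_or]
      split <;> rfl
    rw [List.foldl_cons, List.foldl_cons, hstep]
    exact ih (PySem.Set.add s y) (fun h => hxl (List.mem_cons_of_mem _ h))
      (fun h => ((PySem.Set.mem_add s y x).mp h).elim hxs (fun h' => hyx h'.symm))

theorem foldl_add_all_eq (tw : List Int) (x : Int) (h : ∀ y ∈ tw, y = x)
    (s : PySem.Set Int) (hx : x ∈ s) : List.foldl PySem.Set.add s tw = s := by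
  induction tw with
  | nil => rfl
  | cons y l ih =>
    have hyx : y = x := h y (by simp)
    have hadd : PySem.Set.add s y = s := by
      simp [PySem.Set.add, PySem.Set.contains, hyx, hx]
    rw [List.foldl_cons, hadd]
    exact ih (fun z hz => h z (by simp [hz]))

theorem ofList_run (x : Int) (tw dw : List Int) (htw : ∀ y ∈ tw, y = x) (hdw : x ∉ dw) :
    PySem.Set.ofList (x :: (tw ++ dw)) = x :: PySem.Set.ofList dw := by
  rw [PySem.Set.ofList_eq_foldl, PySem.Set.ofList_eq_foldl, List.foldl_cons, List.foldl_append]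
  have h0 : PySem.Set.add [] x = [x] := rfl
  rw [h0, foldl_add_all_eq tw x htw [x] (by simp)]
  exact foldl_add_cons dw [] x hdw (by simp)

theorem not_mem_dropWhile_of_sorted (x : Int) (r : List Int)
    (hs : (x :: r).Pairwise (· ≤ ·)) : x ∉ r.dropWhile (· == x) := by
  intro hx
  have hne : r.dropWhile (· == x) ≠ [] := List.ne_nil_of_mem hx
  obtain ⟨hh, tl, hcons⟩ : ∃ hh tl, r.dropWhile (· == x) = hh :: tl := by
    cases hc : r.dropWhile (· == x) with
    | nil => exact absurd hc hne
    | cons a b => exact ⟨a, b, rfl⟩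
  have hph := List.head_dropWhile_not (· == x) hne
  have hhead : (r.dropWhile (· == x)).head hne = hh := by simp [hcons]
  have hhx : hh ≠ x := by
    rw [hhead] at hph; simpa using hph
  have hsub : (r.dropWhile (· == x)).Sublist r := List.dropWhile_sublist _
  have hxr : ∀ y ∈ r, x ≤ y := (List.pairwise_cons.mp hs).1
  have hdp : (r.dropWhile (· == x)).Pairwise (· ≤ ·) :=
    ((List.pairwise_cons.mp hs).2).sublist hsub
  have h1 : x ≤ hh := hxr hh (hsub.mem (by simp [hcons]))
  have hxtl : x ∈ tl := by
    rw [hcons] at hx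
    rcases List.mem_cons.mp hx with h | h
    · exact absurd h.symm hhx
    · exact h
  have h2 : hh ≤ x := by
    rw [hcons] at hdp
    exact (List.pairwise_cons.mp hdp).1 x hxtl
  exact hhx (le_antisymm h2 h1)

theorem scanRuns_sorted (t : List Int) (m : Int) :
    t.Pairwise (· ≤ ·) → 0 ≤ m → scanRuns t m = max m (bmax t) := by
  induction t, m using scanRuns.induct with
  | case1 m =>
    intro _ hm
    have : bmax [] = 0 := rfl
    rw [scanRuns, this, max_eq_left hm]
  | case2 x r m ih =>
    intro hs hm
    have htw : ∀ y ∈ r.takeWhile (· == x), y = x :=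
      fun y hy => by simpa using List.mem_takeWhile_imp hy
    have hdw : x ∉ r.dropWhile (· == x) := not_mem_dropWhile_of_sorted x r hs
    have hr : r.takeWhile (· == x) ++ r.dropWhile (· == x) = r := List.takeWhile_append_dropWhile
    have hdp : (r.dropWhile (· == x)).Pairwise (· ≤ ·) :=
      (List.pairwise_cons.mp hs).2.sublist (List.dropWhile_sublist _)
    set K : Int := ((r.takeWhile (· == x)).length : Int) with hK
    have hm' : (if 1 + K > m then 1 + K else m) = max m (1 + K) := by
      by_cases hc : 1 + K > m
      · rw [if_pos hc]; exact (max_eq_right (le_of_lt hc)).symm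
      · rw [if_neg hc]; exact (max_eq_left (by omega)).symm
    have hbm : bmax (x :: r) = max (1 + K) (bmax (r.dropWhile (· == x))) := by
      have hofl : PySem.Set.ofList (x :: r) = x :: PySem.Set.ofList (r.dropWhile (· == x)) := by
        conv_lhs => rw [← hr]
        exact ofList_run x _ _ htw hdw
      have hcx : (((x :: r).count x : Int)) = 1 + K := by
        have h1 : (r.takeWhile (· == x)).count x = (r.takeWhile (· == x)).length :=
          List.count_eq_length.mpr (fun b hb => (htw b hb).symm)
        have h2 : (r.dropWhile (· == x)).count x = 0 := List.count_eq_zero.mpr hdw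
        conv_lhs => rw [← hr]
        rw [List.count_cons_self, List.count_append, h1, h2, hK]
        push_cast; ring
      have hcv : ∀ v ∈ PySem.Set.ofList (r.dropWhile (· == x)),
          (fun kk => (((x :: r).count kk : Int))) v
            = (fun kk => (((r.dropWhile (· == x)).count kk : Int))) v := by
        intro v hv
        have hvdw : v ∈ r.dropWhile (· == x) := (PySem.Set.mem_ofList _ v).mp hv
        have hvx : v ≠ x := fun h => hdw (h ▸ hvdw)
        have hvtw : (r.takeWhile (· == x)).count v = 0 :=
          List.count_eq_zero.mpr (fun h => hvx (htw v h))
        simp only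
        conv_lhs => rw [← hr]
        rw [List.count_cons_of_ne hvx.symm, List.count_append, hvtw]
        push_cast; ring
      unfold bmax
      rw [hofl, List.map_cons, hcx, List.map_congr_left hcv, List.foldl_cons,
        max_comm (0 : Int) (1 + K), foldl_max_max]
    rw [scanRuns, ← hK, hm']
    rw [dite_eq_ite, hm'] at ih
    rw [ih hdp (le_trans hm (le_max_left _ _)), hbm, max_assoc]

theorem fInner_ge (s : List Int) (i : Int) (fuel : Nat) (j : Int) : j ≤ fInner s i fuel j := by
  induction fuel generalizing j with
  | zero => exact le_refl j
  | succ fuel ih =>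
    rw [fInner]
    split
    · exact le_trans (by omega) (ih (j + 1))
    · exact le_refl j

theorem pyGet?_nonneg (t : List Int) (j : Int) (h0 : 0 ≤ j) (hlt : j < (t.length : Int)) :
    PySem.List.pyGet? t j = some (t[j.toNat]'(by omega)) := by
  simp [PySem.List.pyGet?, PySem.List.pyIdx?, h0, hlt]

theorem fInner_eq (t : List Int) (v i : Int) (hi : PySem.List.pyGet? t i = some v) :
    ∀ (fuel : Nat) (j : Int), 0 ≤ j → ((t.length : Int) - j).toNat < fuel →
    fInner t i fuel j = j + (((t.drop j.toNat).takeWhile (fun y => y == v)).length : Int) := by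
  intro fuel
  induction fuel with
  | zero => intro j _ hfuel; omega
  | succ fuel ih =>
    intro j hj hfuel
    rw [fInner]
    by_cases h : j < (t.length : Int) ∧ (PySem.List.pyGet? t i == PySem.List.pyGet? t j) = true
    · rw [if_pos h]
      have hjlt : j < (t.length : Int) := h.1
      have hjn : j.toNat < t.length := by omega
      have hgj : PySem.List.pyGet? t j = some (t[j.toNat]) := pyGet?_nonneg t j hj hjlt
      have hvj : t[j.toNat] = v := by
        have := eq_of_beq h.2
        rw [hi, hgj] at this
        exact (Option.some.inj this).symm
      have hdropc : t.drop j.toNat = t[j.toNat] :: t.drop (j.toNat + 1) :=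
        List.drop_eq_getElem_cons hjn
      have hsucc : (j + 1).toNat = j.toNat + 1 := by omega
      rw [ih (j + 1) (by omega) (by omega), hsucc, hdropc, hvj]
      rw [List.takeWhile_cons_of_pos (by simp)]
      simp only [List.length_cons]
      push_cast; ring
    · rw [if_neg h]
      by_cases hjlt : j < (t.length : Int)
      · have hjn : j.toNat < t.length := by omega
        have hgj : PySem.List.pyGet? t j = some (t[j.toNat]) := pyGet?_nonneg t j hj hjlt
        have hne : ¬ (PySem.List.pyGet? t i == PySem.List.pyGet? t j) = true := fun hb => h ⟨hjlt, hb⟩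
        have hvj : t[j.toNat] ≠ v := by
          intro hv
          exact hne (by rw [hi, hgj, hv]; simp)
        rw [List.drop_eq_getElem_cons hjn, List.takeWhile_cons_of_neg (by simpa using hvj)]
        simp
      · rw [List.drop_of_length_le (by omega)]
        simp

theorem fOuter_eq (t : List Int) : ∀ (fuel : Nat) (i m : Int),
    ((t.length : Int) - i).toNat < fuel → 0 ≤ i →
    fOuter t fuel i (i + 1) m = scanRuns (t.drop i.toNat) m := by
  intro fuel
  induction fuel with
  | zero => intro i m hfuel _; omega
  | succ fuel ih =>
    intro i m hfuel hi
    rw [fOuter]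
    by_cases hlen : i < (t.length : Int)
    · rw [if_pos hlen]
      have hin : i.toNat < t.length := by omega
      have hgv : PySem.List.pyGet? t i = some (t[i.toNat]) := pyGet?_nonneg t i hi hlen
      have hfi := fInner_eq t (t[i.toNat]) i hgv (t.length + 1) (i + 1) (by omega) (by omega)
      have hsucc : (i + 1).toNat = i.toNat + 1 := by omega
      rw [hsucc] at hfi
      set K : Nat := ((t.drop (i.toNat + 1)).takeWhile (fun y => y == t[i.toNat])).length with hKdef
      have hge : i + 1 ≤ fInner t i (t.length + 1) (i + 1) := fInner_ge t i _ (i + 1)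
      show fOuter t fuel (fInner t i (t.length + 1) (i + 1)) (fInner t i (t.length + 1) (i + 1) + 1)
        (if fInner t i (t.length + 1) (i + 1) - i > m then fInner t i (t.length + 1) (i + 1) - i else m) = _
      rw [ih (fInner t i (t.length + 1) (i + 1)) _ (by omega) (by omega)]
      have hj'toNat : (fInner t i (t.length + 1) (i + 1)).toNat = i.toNat + 1 + K := by omega
      have hdropj' : t.drop (fInner t i (t.length + 1) (i + 1)).toNat
          = (t.drop (i.toNat + 1)).dropWhile (fun y => y == t[i.toNat]) := by
        rw [hj'toNat, ← drop_len_takeWhile (fun y => y == t[i.toNat]) (t.drop (i.toNat + 1)),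
          List.drop_drop, ← hKdef]
      have hmacc : (if fInner t i (t.length + 1) (i + 1) - i > m then fInner t i (t.length + 1) (i + 1) - i else m)
          = (if 1 + (K : Int) > m then 1 + (K : Int) else m) := by
        rw [hfi]
        have harith : i + 1 + (K : Int) - i = 1 + (K : Int) := by ring
        rw [harith]
      rw [hdropj', hmacc]
      conv_rhs => rw [List.drop_eq_getElem_cons hin, scanRuns]
    · rw [if_neg hlen, List.drop_of_length_le (by omega), scanRuns]

theorem bmax_perm (t s : List Int) (h : t.Perm s) : bmax t = bmax s := by
  unfold bmax
  have hfun : (fun kk => ((t.count kk : Int))) = fun kk => ((s.count kk : Int)) :=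
    funext fun kk => by rw [h.count_eq]
  have hofp : (PySem.Set.ofList t).Perm (PySem.Set.ofList s) :=
    (List.perm_ext_iff_of_nodup (PySem.Set.nodup_ofList t) (PySem.Set.nodup_ofList s)).mpr
      (fun a => by rw [PySem.Set.mem_ofList, PySem.Set.mem_ofList]; exact h.mem_iff)
  rw [hfun]
  exact (hofp.map _).foldl_eq 0

theorem f_eq_f_alt (n : Int) (a_arr : List Int) : f n a_arr = f_alt n a_arr := by
  have halt : f_alt n a_arr = bmax (buildSums n a_arr) := by
    unfold f_alt
    rw [dict_eq]
    show (match PySem.List.max? ((PySem.Dict.counter (buildSums n a_arr)).values) (fun v => v) with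
      | some m => m | none => 0) = bmax (buildSums n a_arr)
    have hvals : (PySem.Dict.counter (buildSums n a_arr)).values
        = (PySem.Set.ofList (buildSums n a_arr)).map
            (fun kk => (((buildSums n a_arr).count kk : Int))) := by
      simp [PySem.Dict.values, PySem.Dict.items_counter, List.map_map, Function.comp]
    rw [hvals, matchmax_eq]
    · rfl
    · intro v hv
      obtain ⟨kk, hkk, rfl⟩ := List.mem_map.mp hv
      have : kk ∈ buildSums n a_arr := (PySem.Set.mem_ofList _ kk).mp hkk
      have := List.count_pos_iff.mpr this
      omega
  have hA : f n a_arr = bmax (PySem.List.sorted (buildSums n a_arr) (fun x => x) false) := by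
    unfold f
    show fOuter (PySem.List.sorted (buildSums n a_arr) (fun x => x) false)
      ((PySem.List.sorted (buildSums n a_arr) (fun x => x) false).length + 1) 0 (0 + 1) 0 = _
    rw [fOuter_eq _ _ 0 0 (by omega) le_rfl]
    have hpw : (PySem.List.sorted (buildSums n a_arr) (fun x => x) false).Pairwise (· ≤ ·) := by
      simpa using PySem.List.sorted_pairwise (buildSums n a_arr) (fun x => x)
    rw [Int.toNat_zero, List.drop_zero, scanRuns_sorted _ 0 hpw le_rfl]
    exact max_eq_right (PySem.List.le_foldl_max _ 0).1
  rw [hA, halt]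
  exact bmax_perm _ _ (PySem.List.sorted_perm _ _ _)

-- ===== VERDICT (by name: the statement is the Claim_ definition above) =====
theorem f_spec : Claim_equal_f := by
  intro n a_arr _ _
  unfold Spec_f
  exact f_eq_f_alt n a_arr
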